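-- pv_equiv track=rewrite | github.com/ElisabethJoan/GoogleFoobar | Level 2/Challenge 2.2.py | solution
-- ===== SOURCE A (Python) =====
-- def solution(s):
--     counter = 0
--     lefts = [pos for pos, char in enumerate(s) if char == "<"]
--     rights = [pos for pos, char in enumerate(s) if char == ">"]
--     for i in range(len(rights)):
--         for j in range(len(lefts)):
--             if rights[i] < lefts[j]:
--                 counter += 2
--
--     return counter
-- ===== SOURCE B (Python) =====
-- def solution(s):
--     gt = 0
--     total = 0
--     for char in s:
--         if char == ">":
--             gt += 1
--         elif char == "<":
--             total += 2 * gt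
--     return total
-- ===== Notes on version B (the rewrite author's own statement) =====
-- stated objective: faster
-- what changed: Replaced the two position-list comprehensions and the quadratic nested loop over all ('>','<') pairs with one left-to-right pass that keeps a running count of '>' seen so far and adds 2*count at each '<'.
import Mathlib
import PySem

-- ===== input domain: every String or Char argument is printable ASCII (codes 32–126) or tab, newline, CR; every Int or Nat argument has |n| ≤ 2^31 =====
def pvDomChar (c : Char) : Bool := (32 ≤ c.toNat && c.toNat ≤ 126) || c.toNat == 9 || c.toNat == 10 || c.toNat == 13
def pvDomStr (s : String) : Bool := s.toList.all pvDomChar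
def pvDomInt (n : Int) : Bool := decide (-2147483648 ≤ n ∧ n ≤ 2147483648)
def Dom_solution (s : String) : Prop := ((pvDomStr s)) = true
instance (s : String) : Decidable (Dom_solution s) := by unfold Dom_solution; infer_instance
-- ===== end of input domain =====

-- B replaces A's quadratic nested loop over all ('>','<') position pairs by a single pass
-- with a running count of '>' seen so far (objective: faster).

-- ===== PORT A =====
-- body of A over the character list (solution applies it to s.toList)
def solutionCore (xs : List Char) : Int :=
  let e := PySem.List.enumerate xs
  let lefts := (e.filter (fun p => p.2 == '<')).map (fun p => p.1)
  let rights := (e.filter (fun p => p.2 == '>')).map (fun p => p.1)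
  rights.foldl (fun counter r => lefts.foldl (fun c l => if r < l then c + 2 else c) counter) 0

def solution (s : String) : Int := solutionCore s.toList

-- ===== PORT B =====
-- one loop step of B: running (count of '>', total)
def bstep (st : Int × Int) (c : Char) : Int × Int :=
  if c == '>' then (st.1 + 1, st.2)
  else if c == '<' then (st.1, st.2 + 2 * st.1)
  else st

def solution_alt (s : String) : Int :=
  (s.toList.foldl bstep (0, 0)).2

-- ===== PRECONDITION & SPEC =====
def Spec_solution (s : String) (out : Int) : Prop := out = solution_alt s
instance (s : String) (out : Int) : Decidable (Spec_solution s out) := by unfold Spec_solution; infer_instance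

-- ===== CLAIM (what is proved, stated in full; the proofs are below) =====
def Claim_equal_solution : Prop := ∀ (s : String), Dom_solution s → Spec_solution s (solution s)

-- ===== LEMMAS AND PROOFS =====

-- the inner loop of A is additive in its accumulator
theorem inner_add (r k : Int) (L : List Int) (c : Int) :
    L.foldl (fun c l => if r < l then c + 2 else c) (c + k)
      = L.foldl (fun c l => if r < l then c + 2 else c) c + k := by
  induction L generalizing c with
  | nil => simp
  | cons a t ih =>
    simp only [List.foldl_cons]
    split_ifs with h
    · rw [show c + k + 2 = (c + 2) + k by ring, ih]
    · exact ih c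

-- if no element exceeds r the inner loop does nothing
theorem inner_const (r : Int) (L : List Int) (h : ∀ l ∈ L, ¬ r < l) (c : Int) :
    L.foldl (fun c l => if r < l then c + 2 else c) c = c := by
  induction L generalizing c with
  | nil => rfl
  | cons a t ih =>
    simp only [List.foldl_cons]
    rw [if_neg (h a (by simp))]
    exact ih (fun l hl => h l (by simp [hl])) c

-- the outer loop of A is additive in its accumulator
theorem outer_add (R lefts : List Int) (k c : Int) :
    R.foldl (fun counter r => lefts.foldl (fun c l => if r < l then c + 2 else c) counter) (c + k)
      = R.foldl (fun counter r => lefts.foldl (fun c l => if r < l then c + 2 else c) counter) c + k := by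
  induction R generalizing c with
  | nil => simp
  | cons a t ih =>
    simp only [List.foldl_cons]
    rw [inner_add, ih]

-- appending a new '<' position n beyond every r ∈ R adds 2 per element of R
theorem outer_snoc_left (R lefts : List Int) (n : Int) (h : ∀ r ∈ R, r < n) (c : Int) :
    R.foldl (fun counter r => (lefts ++ [n]).foldl (fun c l => if r < l then c + 2 else c) counter) c
      = R.foldl (fun counter r => lefts.foldl (fun c l => if r < l then c + 2 else c) counter) c
        + 2 * R.length := by
  induction R generalizing c with
  | nil => simp
  | cons a t ih =>
    simp only [List.foldl_cons]
    have h1 : (lefts ++ [n]).foldl (fun c l => if a < l then c + 2 else c) c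
        = lefts.foldl (fun c l => if a < l then c + 2 else c) c + 2 := by
      rw [List.foldl_append]
      simp [if_pos (h a (by simp))]
    rw [h1, ih (fun r hr => h r (by simp [hr])), outer_add]
    push_cast [List.length_cons]
    ring

-- positions in an enumeration from 0 are below the length
theorem mem_pos_lt (xs : List Char) (P : Int × Char → Bool) (l : Int)
    (hl : l ∈ ((PySem.List.enumerate xs).filter P).map (fun p => p.1)) :
    0 ≤ l ∧ l < (xs.length : Int) := by
  simp only [List.mem_map, List.mem_filter] at hl
  obtain ⟨p, ⟨hpe, _⟩, rfl⟩ := hl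
  rw [PySem.List.mem_enumerate_iff] at hpe
  obtain ⟨k, hk, rfl⟩ := hpe
  constructor <;> simp <;> omega

-- number of '>'-entries of the enumeration equals countP on the characters
theorem filter_enum_len (xs : List Char) (ch : Char) (s : Int) :
    (((PySem.List.enumerate xs s).filter (fun p => p.2 == ch)).length) = xs.countP (fun c => c == ch) := by
  induction xs generalizing s with
  | nil => simp [PySem.List.enumerate_nil]
  | cons a t ih =>
    simp only [PySem.List.enumerate_cons, List.filter_cons, List.countP_cons]
    by_cases h : a == ch <;> simp [h, ih]

theorem main_inv (xs : List Char) :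
    xs.foldl bstep (0, 0) = ((xs.countP (fun c => c == '>') : Int), solutionCore xs) := by
  induction xs using List.reverseRecOn with
  | nil => simp [solutionCore, PySem.List.enumerate_nil]
  | append_singleton ys x ih =>
    rw [List.foldl_append, List.foldl_cons, List.foldl_nil, ih]
    have hL : ∀ l ∈ ((PySem.List.enumerate ys).filter (fun p => p.2 == '<')).map
        (fun p => p.1), l < (ys.length : Int) :=
      fun l hl => (mem_pos_lt ys _ l hl).2
    have hR : ∀ r ∈ ((PySem.List.enumerate ys).filter (fun p => p.2 == '>')).map
        (fun p => p.1), r < (ys.length : Int) :=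
      fun r hr => (mem_pos_lt ys _ r hr).2
    by_cases hgt : x = '>'
    · subst hgt
      have e2 : ((('>' : Char)) == '<') = false := by decide
      have e3 : ((('>' : Char)) == '>') = true := by decide
      simp only [solutionCore, bstep, PySem.List.enumerate_append, PySem.List.enumerate_cons,
        PySem.List.enumerate_nil, List.filter_append, List.filter_cons, List.filter_nil,
        List.map_append, List.map_cons, List.map_nil, List.countP_append, List.countP_cons,
        List.countP_nil, e2, e3]
      simp only [if_true, Bool.false_eq_true, if_false, List.append_nil]
      simp only [List.map_cons, List.map_nil, List.append_nil, zero_add,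
        List.foldl_cons, List.foldl_nil]
      rw [List.foldl_append, List.foldl_cons, List.foldl_nil]
      rw [inner_const _ _ (fun l hl => not_lt.2 (le_of_lt (hL l hl)))]
      refine Prod.ext ?_ rfl
      push_cast
      ring
    · by_cases hlt : x = '<'
      · subst hlt
        have e2 : ((('<' : Char)) == '<') = true := by decide
        have e3 : ((('<' : Char)) == '>') = false := by decide
        simp only [solutionCore, bstep, PySem.List.enumerate_append, PySem.List.enumerate_cons,
          PySem.List.enumerate_nil, List.filter_append, List.filter_cons, List.filter_nil,
          List.map_append, List.map_cons, List.map_nil, List.countP_append, List.countP_cons,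
          List.countP_nil, e2, e3]
        simp only [if_true, Bool.false_eq_true, if_false, List.append_nil]
        simp only [List.map_cons, List.map_nil, List.append_nil, zero_add]
        rw [outer_snoc_left _ _ _ (fun r hr => hR r hr)]
        rw [List.length_map, filter_enum_len]
        refine Prod.ext rfl ?_
        push_cast
        ring
      · have h1 : (x == '>') = false := by simpa using hgt
        have h2 : (x == '<') = false := by simpa using hlt
        simp only [bstep, h1, h2, Bool.false_eq_true, if_false]
        simp [solutionCore, PySem.List.enumerate_append, PySem.List.enumerate_cons,
          PySem.List.enumerate_nil, List.filter_append, List.filter_cons, List.filter_nil,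
          List.countP_append, List.countP_cons, h1, h2]

-- ===== VERDICT (by name: the statement is the Claim_ definition above) =====
theorem solution_spec : Claim_equal_solution := by
  intro s _
  unfold Spec_solution solution solution_alt
  rw [main_inv]
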